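-- pv_equiv track=rewrite | github.com/abhigit-saha/mcp-legal-search | mcp_flight_search/services/search_service.py | prioritize_document_links
-- ===== SOURCE A (Python) =====
-- from typing import List, Dict, Optional, Any
--
-- def prioritize_document_links(results: List[Dict[str, Any]]) -> List[Dict[str, Any]]:
--     """
--     Prioritize results that are likely to be direct document links.
--     """
--     direct_docs = []
--     web_pages = []
--
--     for result in results:
--         url = result.get("link", "").lower()
--         title = result.get("title", "").lower()
--
--         # Check if it's likely a direct document
--         if (is_direct_document_link(url, title)):
--             direct_docs.append(result)
--         else:
--             web_pages.append(result)
--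
--     # Return direct documents first, then web pages
--     return direct_docs + web_pages
--
-- def is_direct_document_link(url: str, title: str) -> bool:
--     """
--     Determine if a URL/title likely points to a direct document.
--     """
--     url_lower = url.lower()
--     title_lower = title.lower()
--
--     # Check for direct file extensions
--     if any(ext in url_lower for ext in ['.pdf', '.doc', '.docx', '.txt']):
--         return True
--
--     # Check for document-indicating keywords in URL
--     doc_indicators = [
--         'download', 'document', 'file', 'attachment', 'forms',
--         'templates', 'samples', 'examples', 'contracts'
--     ]
--     if any(indicator in url_lower for indicator in doc_indicators):
--         return True
--
--     # Check for document-indicating keywords in title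
--     title_indicators = [
--         'download', 'pdf', 'template', 'form', 'sample',
--         'example', 'document', '[pdf]', '(pdf)', '.pdf'
--     ]
--     if any(indicator in title_lower for indicator in title_indicators):
--         return True
--
--     # Check for legal document repositories
--     legal_sites = [
--         'sec.gov', 'courts.gov', 'lawinsider.com', 'contractstandards.com',
--         'findlaw.com', 'justia.com', 'docracy.com', 'lawdepot.com'
--     ]
--     if any(site in url_lower for site in legal_sites):
--         return True
--
--     return False
-- ===== SOURCE B (Python) =====
-- from typing import List, Dict, Any
--
-- # All patterns whose presence in the (lowercased) URL marks a document link: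
-- # file extensions, document keywords, and legal-repository domains combined.
-- _URL_PATTERNS = ['.pdf', '.doc', '.docx', '.txt',
--                  'download', 'document', 'file', 'attachment', 'forms',
--                  'templates', 'samples', 'examples', 'contracts',
--                  'sec.gov', 'courts.gov', 'lawinsider.com', 'contractstandards.com',
--                  'findlaw.com', 'justia.com', 'docracy.com', 'lawdepot.com']
-- _TITLE_PATTERNS = ['download', 'pdf', 'template', 'form', 'sample',
--                    'example', 'document', '[pdf]', '(pdf)', '.pdf']
--
-- def is_direct_document_link(url: str, title: str) -> bool:
--     """True iff any URL pattern occurs in url or any title pattern in title."""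
--     u = url.lower()
--     t = title.lower()
--     return any(p in u for p in _URL_PATTERNS) or any(p in t for p in _TITLE_PATTERNS)
--
-- def prioritize_document_links(results: List[Dict[str, Any]]) -> List[Dict[str, Any]]:
--     """
--     Prioritize results that are likely direct document links: one stable sort
--     on a 0/1 key keeps document links first, each group in original order.
--     """
--     return sorted(
--         results,
--         key=lambda r: 0 if is_direct_document_link(r.get("link", "").lower(),
--                                                    r.get("title", "").lower()) else 1,
--     )
-- ===== Notes on version B (the rewrite author's own statement) =====
-- stated objective: idiomatic
-- what changed: Replaced the explicit two-accumulator partition loop by one stable sorted() call on a 0/1 key, and collapsed the helper's four sequential keyword scans into a single disjunction over one merged URL-pattern table plus the title-pattern table.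
import Mathlib
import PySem

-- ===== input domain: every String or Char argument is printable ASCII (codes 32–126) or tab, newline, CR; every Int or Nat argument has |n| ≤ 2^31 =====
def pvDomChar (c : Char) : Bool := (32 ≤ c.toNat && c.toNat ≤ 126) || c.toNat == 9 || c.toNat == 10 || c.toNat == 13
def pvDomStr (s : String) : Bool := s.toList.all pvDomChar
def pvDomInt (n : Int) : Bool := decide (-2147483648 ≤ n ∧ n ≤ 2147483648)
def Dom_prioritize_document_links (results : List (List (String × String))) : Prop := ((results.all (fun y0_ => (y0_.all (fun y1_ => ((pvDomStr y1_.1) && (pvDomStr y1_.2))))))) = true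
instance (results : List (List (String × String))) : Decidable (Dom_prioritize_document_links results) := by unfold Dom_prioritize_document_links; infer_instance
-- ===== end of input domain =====

-- B replaces A's two-accumulator partition loop by one stable sort on a 0/1 key and merges the
-- helper's four sequential scans into one disjunction over two pattern tables (idiomatic; return value only).

-- ===== PORT A =====
def is_direct_document_link (url title : String) : Bool :=
  let url_lower := PySem.Str.lower url
  let title_lower := PySem.Str.lower title
  if [".pdf", ".doc", ".docx", ".txt"].any (fun ext => PySem.Str.isIn ext url_lower) then
    true
  else if ["download", "document", "file", "attachment", "forms",
           "templates", "samples", "examples", "contracts"].any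
            (fun indicator => PySem.Str.isIn indicator url_lower) then
    true
  else if ["download", "pdf", "template", "form", "sample",
           "example", "document", "[pdf]", "(pdf)", ".pdf"].any
            (fun indicator => PySem.Str.isIn indicator title_lower) then
    true
  else if ["sec.gov", "courts.gov", "lawinsider.com", "contractstandards.com",
           "findlaw.com", "justia.com", "docracy.com", "lawdepot.com"].any
            (fun site => PySem.Str.isIn site url_lower) then
    true
  else
    false

-- A's loop: two accumulators, append to one or the other
def pv_a_loop (rs : List (List (String × String)))
    (direct_docs web_pages : List (List (String × String))) :
    List (List (String × String)) × List (List (String × String)) :=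
  match rs with
  | [] => (direct_docs, web_pages)
  | result :: rest =>
    let url := PySem.Str.lower (PySem.Dict.getD (PySem.Dict.mk result) "link" "")
    let title := PySem.Str.lower (PySem.Dict.getD (PySem.Dict.mk result) "title" "")
    if is_direct_document_link url title then
      pv_a_loop rest (direct_docs ++ [result]) web_pages
    else
      pv_a_loop rest direct_docs (web_pages ++ [result])

def prioritize_document_links (results : List (List (String × String))) : List (List (String × String)) :=
  let dw := pv_a_loop results [] []
  dw.1 ++ dw.2

-- ===== PORT B =====
def pv_url_patterns : List String :=
  [".pdf", ".doc", ".docx", ".txt",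
   "download", "document", "file", "attachment", "forms",
   "templates", "samples", "examples", "contracts",
   "sec.gov", "courts.gov", "lawinsider.com", "contractstandards.com",
   "findlaw.com", "justia.com", "docracy.com", "lawdepot.com"]

def pv_title_patterns : List String :=
  ["download", "pdf", "template", "form", "sample",
   "example", "document", "[pdf]", "(pdf)", ".pdf"]

def is_direct_document_link_alt (url title : String) : Bool :=
  let u := PySem.Str.lower url
  let t := PySem.Str.lower title
  pv_url_patterns.any (fun p => PySem.Str.isIn p u)
    || pv_title_patterns.any (fun p => PySem.Str.isIn p t)

def prioritize_document_links_alt (results : List (List (String × String))) : List (List (String × String)) :=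
  PySem.List.sorted results
    (fun r => if is_direct_document_link_alt
                  (PySem.Str.lower (PySem.Dict.getD (PySem.Dict.mk r) "link" ""))
                  (PySem.Str.lower (PySem.Dict.getD (PySem.Dict.mk r) "title" ""))
              then (0 : Int) else 1)
    false

-- ===== PRECONDITION & SPEC =====
def Spec_prioritize_document_links (results : List (List (String × String))) (out : List (List (String × String))) : Prop := out = prioritize_document_links_alt results
instance (results : List (List (String × String))) (out : List (List (String × String))) : Decidable (Spec_prioritize_document_links results out) := by unfold Spec_prioritize_document_links; infer_instance

-- ===== CLAIM (what is proved, stated in full; the proofs are below) =====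
def Claim_equal_prioritize_document_links : Prop := ∀ (results : List (List (String × String))), Dom_prioritize_document_links results → Spec_prioritize_document_links results (prioritize_document_links results)

-- ===== LEMMAS AND PROOFS =====

-- the two helpers agree: B's merged URL table is A's three URL lists concatenated,
-- and a 4-way if-chain of Bool tests is their disjunction
lemma pv_pred_eq (url title : String) :
    is_direct_document_link_alt url title = is_direct_document_link url title := by
  unfold is_direct_document_link_alt is_direct_document_link
  have hsplit : pv_url_patterns
      = [".pdf", ".doc", ".docx", ".txt"]
        ++ ["download", "document", "file", "attachment", "forms",
            "templates", "samples", "examples", "contracts"]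
        ++ ["sec.gov", "courts.gov", "lawinsider.com", "contractstandards.com",
            "findlaw.com", "justia.com", "docracy.com", "lawdepot.com"] := rfl
  rw [hsplit]
  simp only [List.any_append, pv_title_patterns]
  generalize ([".pdf", ".doc", ".docx", ".txt"].any _ : Bool) = a1
  generalize (List.any _ _ : Bool) = a2
  generalize (List.any _ _ : Bool) = a3
  generalize (List.any _ _ : Bool) = a4
  cases a1 <;> cases a2 <;> cases a3 <;> cases a4 <;> simp

-- the predicate A computes on each result
def pvPred (r : List (String × String)) : Bool :=
  is_direct_document_link
    (PySem.Str.lower (PySem.Dict.getD (PySem.Dict.mk r) "link" ""))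
    (PySem.Str.lower (PySem.Dict.getD (PySem.Dict.mk r) "title" ""))

-- the 0/1 key of B
def pvKey (r : List (String × String)) : Int := if pvPred r then 0 else 1

lemma pv_aLoop_eq (rs d w : List (List (String × String))) :
    pv_a_loop rs d w = (d ++ rs.filter pvPred, w ++ rs.filter (fun r => ! pvPred r)) := by
  induction rs generalizing d w with
  | nil => simp [pv_a_loop]
  | cons r rest ih =>
    simp only [pv_a_loop]
    by_cases h : pvPred r = true
    · rw [if_pos (by simpa [pvPred] using h), ih]
      simp [h]
    · rw [if_neg (by simpa [pvPred] using h), ih]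
      simp only [Bool.not_eq_true] at h
      simp [h]

-- inserting a key-0 element into (key-0 block ++ key-1 block) puts it between the blocks
lemma pv_insertBy_split {α : Type} (before : α → α → Bool) (x : α) (d w : List α)
    (hd : ∀ a ∈ d, before x a = false) (hw : ∀ a ∈ w, before x a = true) :
    PySem.List.insertBy before x (d ++ w) = d ++ x :: w := by
  induction d with
  | nil =>
    cases w with
    | nil => simp [PySem.List.insertBy]
    | cons y ys => simp [PySem.List.insertBy, hw y (by simp)]
  | cons a d ih =>
    have ha : before x a = false := hd a (by simp)
    simp only [List.cons_append, PySem.List.insertBy, ha]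
    simp only [ih (fun b hb => hd b (by simp [hb]))]
    simp

-- the stable insertion-sort fold with a 0/1 key maintains the two blocks
lemma pv_fold_01 (xs d w : List (List (String × String)))
    (hd : ∀ a ∈ d, pvKey a = 0) (hw : ∀ a ∈ w, pvKey a = 1) :
    xs.foldl (fun acc x => PySem.List.insertBy (fun a b => decide (pvKey a < pvKey b)) x acc) (d ++ w)
      = (d ++ xs.filter pvPred) ++ (w ++ xs.filter (fun r => ! pvPred r)) := by
  induction xs generalizing d w with
  | nil => simp
  | cons x xs ih =>
    simp only [List.foldl_cons]
    by_cases h : pvPred x = true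
    · have hx : pvKey x = 0 := by simp [pvKey, h]
      rw [pv_insertBy_split _ x d w
            (fun a ha => by simp [hx, hd a ha])
            (fun a ha => by simp [hx, hw a ha])]
      have := ih (d ++ [x]) w
        (by intro a ha; rcases List.mem_append.1 ha with h1 | h1
            · exact hd a h1
            · simp at h1; simp [h1, hx]) hw
      simp only [List.append_assoc, List.cons_append, List.nil_append] at this ⊢
      rw [this]
      simp [h]
    · simp only [Bool.not_eq_true] at h
      have hx : pvKey x = 1 := by simp [pvKey, h]
      rw [PySem.List.insertBy_of_forall_not_before _ x (d ++ w)
            (by intro a ha; rcases List.mem_append.1 ha with h1 | h1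
                · simp [hx, hd a h1]
                · simp [hx, hw a h1])]
      have := ih d (w ++ [x])
        hd
        (by intro a ha; rcases List.mem_append.1 ha with h1 | h1
            · exact hw a h1
            · simp at h1; simp [h1, hx])
      simp only [List.append_assoc, List.cons_append, List.nil_append] at this ⊢
      rw [this]
      simp [h]

lemma pv_alt_eq (results : List (List (String × String))) :
    prioritize_document_links_alt results
      = results.filter pvPred ++ results.filter (fun r => ! pvPred r) := by
  have hk : (fun r => if is_direct_document_link_alt
                  (PySem.Str.lower (PySem.Dict.getD (PySem.Dict.mk r) "link" ""))
                  (PySem.Str.lower (PySem.Dict.getD (PySem.Dict.mk r) "title" ""))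
              then (0 : Int) else 1) = pvKey := by
    funext r; simp [pvKey, pvPred, pv_pred_eq]
  unfold prioritize_document_links_alt
  rw [hk, PySem.List.sorted_eq_foldl_insertBy]
  have := pv_fold_01 results [] [] (by simp) (by simp)
  simpa using this

-- ===== VERDICT (by name: the statement is the Claim_ definition above) =====
theorem prioritize_document_links_spec : Claim_equal_prioritize_document_links := by
  intro results _
  unfold Spec_prioritize_document_links
  rw [pv_alt_eq]
  unfold prioritize_document_links
  rw [show pv_a_loop results [] [] = ([] ++ results.filter pvPred, [] ++ results.filter (fun r => ! pvPred r)) from pv_aLoop_eq results [] []]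
  simp
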